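-- pv_equiv track=rewrite | github.com/7Heun/Algorithm_study | 프로그래머스/3/84021. 퍼즐 조각 채우기/퍼즐 조각 채우기.py | solution
-- ===== SOURCE A (Python) =====
-- from collections import deque
--
-- def solution(game_board, table):
--     # 이어진 블럭 찾는 dfs 함수
--     def dfs(x, y, base_x, base_y, target_value, board, visited):
--         block = []
--         visited[x][y] = True
--         stack = deque([(x, y)])
--         while stack:
--             cx, cy = stack.pop()
--             block.append((cx - base_x, cy - base_y))
--             for dx, dy in [(0, -1), (0, 1), (-1, 0), (1, 0)]:
--                 nx, ny = cx + dx, cy + dy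
--                 if 0 <= nx < len(board) and 0 <= ny < len(board) and not visited[nx][ny]:
--                     if board[nx][ny] == target_value:
--                         visited[nx][ny] = True
--                         stack.append((nx, ny))
--         return block
--
--     # 블럭 90도 회전시키는 함수
--     def rotate(block):
--         return [(-y, x) for x, y in block]
--     # 블럭 모양 표준화하는 함수 (x, y 최솟값을 기준으로 좌표가 0, 0부터 시작하게 조정)
--     def normalize(block):
--         min_x, min_y = min(x for x, y in block), min(y for x, y in block)
--         return sorted([(x - min_x, y - min_y) for x, y in block])
--
--     N = len(table)
--     ans = 0
--
--     # table에서 1로 이어진 블럭들 추출해서 저장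
--     visited = [[False] * N for _ in range(N)]
--     blocks = []
--     for i in range(N):
--         for j in range(N):
--             if table[i][j] == 1 and not visited[i][j]:
--                 block = dfs(i, j, i, j, 1, table, visited)
--                 blocks.append(normalize(block))
--
--     # game_board에서 0으로 이어진 빈 공간 추출해서 맞는 블럭 있는지 확인
--     visited = [[False] * N for _ in range(N)]
--     for i in range(N):
--         for j in range(N):
--             if game_board[i][j] == 0 and not visited[i][j]:
--                 vacancy = dfs(i, j, i, j, 0, game_board, visited)
--                 matched = False
--                 for block in blocks:
--                     rotated = block[:]
--                     for _ in range(4):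
--                         rotated = rotate(rotated)
--                         if normalize(rotated) == normalize(vacancy):
--                             ans += len(rotated)
--                             blocks.remove(block)
--                             matched = True
--                             break
--                     if matched: break
--     return ans
-- ===== SOURCE B (Python) =====
-- def solution(game_board, table):
--     # Flattened single-array scan with a visited *set* and arithmetic neighbor
--     # guards, plus counter-keyed matching by canonical rotation form, instead of
--     # 2-D visited matrices and a greedy rescan of the block list per vacancy.
--     n = len(table)
--
--     def normalize(cells):
--         mx = min(x for x, y in cells)
--         my = min(y for x, y in cells)
--         return sorted((x - mx, y - my) for x, y in cells)
--
--     def canonical(shape):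
--         best = None
--         for _ in range(4):
--             shape = [(-y, x) for x, y in shape]
--             ns = normalize(shape)
--             if best is None or ns < best:
--                 best = ns
--         return tuple(best)
--
--     def neighbors(c):
--         out = []
--         if c % n != 0:
--             out.append(c - 1)
--         if c % n != n - 1:
--             out.append(c + 1)
--         if c >= n:
--             out.append(c - n)
--         if c + n < n * n:
--             out.append(c + n)
--         return out
--
--     def components(flat, target):
--         seen = set()
--         comps = []
--         for k in range(n * n):
--             if flat[k] == target and k not in seen:
--                 seen.add(k)
--                 stack = [k]
--                 cells = []
--                 while stack:
--                     c = stack.pop()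
--                     cells.append((c // n, c % n))
--                     for m in neighbors(c):
--                         if m not in seen and flat[m] == target:
--                             seen.add(m)
--                             stack.append(m)
--                 comps.append(normalize(cells))
--         return comps
--
--     supply = {}
--     for shape in components([v for row in table for v in row], 1):
--         key = canonical(shape)
--         supply[key] = supply.get(key, 0) + 1
--
--     ans = 0
--     for vac in components([v for row in game_board for v in row], 0):
--         key = canonical(vac)
--         if supply.get(key, 0) > 0:
--             supply[key] -= 1
--             ans += len(vac)
--     return ans
-- ===== Notes on version B (the rewrite author's own statement) =====
-- stated objective: alternative
-- what changed: B flattens each board into one 1-D array and scans it with a single loop, flood-filling over integer indices with per-direction arithmetic guards and a visited *set* (instead of A's nested row/column loops over a 2-D boolean matrix), and it matches pieces to vacancies through a counter keyed by each shape's canonical rotation form built once from the table, replacing A's per-vacancy greedy rescan of the block list with 4 rotations and re-normalizations per pair.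
-- outside the precondition, e.g. on solution([[1, 0, 1], [1, 0, 0]], [[0, 0, 1], [1, 1, 1]]): A returns 2, B returns 0
import Mathlib
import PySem

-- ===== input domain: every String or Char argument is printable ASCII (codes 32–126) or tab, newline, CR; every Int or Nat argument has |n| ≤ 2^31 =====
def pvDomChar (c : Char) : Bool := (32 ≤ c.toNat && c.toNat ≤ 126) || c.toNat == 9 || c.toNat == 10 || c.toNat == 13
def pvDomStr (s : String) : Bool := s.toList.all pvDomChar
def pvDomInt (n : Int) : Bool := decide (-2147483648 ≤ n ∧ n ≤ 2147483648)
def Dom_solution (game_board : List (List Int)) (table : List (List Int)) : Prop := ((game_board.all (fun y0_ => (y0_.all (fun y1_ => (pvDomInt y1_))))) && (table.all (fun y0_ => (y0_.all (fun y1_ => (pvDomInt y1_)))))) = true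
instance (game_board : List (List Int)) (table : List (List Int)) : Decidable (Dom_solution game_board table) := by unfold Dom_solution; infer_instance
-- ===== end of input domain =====

-- B flattens each board into one 1-D array scanned by a single loop, flood-filling over
-- integer indices with per-direction arithmetic guards and a visited *set* (instead of A's
-- nested row/column loops over a 2-D boolean matrix), and matches pieces to vacancies through
-- a counter keyed by each shape's canonical rotation form (instead of A's per-vacancy greedy
-- rescan of the block list with 4 rotations per pair).

-- shared helper: both Python sources contain the identical normalize() helper,
-- so it is ported once and used by both ports.
def pyMinInt (l : List Int) : Int := (PySem.List.min? l (fun v => v)).getD 0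
def pyNormalize (block : List (Int × Int)) : List (Int × Int) :=
  let mx := pyMinInt (block.map (·.1))
  let my := pyMinInt (block.map (·.2))
  PySem.List.sorted2 (block.map (fun p => (p.1 - mx, p.2 - my))) (·.1) (·.2)

-- ===== PORT A =====
def gridGet (g : List (List Int)) (x y : Int) : Int :=
  PySem.List.pyGetD (PySem.List.pyGetD g x []) y 0
def visGet (v : List (List Bool)) (x y : Int) : Bool :=
  PySem.List.pyGetD (PySem.List.pyGetD v x []) y false
def visSet (v : List (List Bool)) (x y : Int) : List (List Bool) :=
  PySem.List.pySetD v x (PySem.List.pySetD (PySem.List.pyGetD v x []) y true)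

def rotateA (block : List (Int × Int)) : List (Int × Int) := block.map (fun p => (-p.2, p.1))

def tryNbrA (board : List (List Int)) (target : Int)
    (sv : List (Int × Int) × List (List Bool)) (nx ny : Int) :
    List (Int × Int) × List (List Bool) :=
  if 0 ≤ nx ∧ nx < (board.length : Int) ∧ 0 ≤ ny ∧ ny < (board.length : Int) ∧
      visGet sv.2 nx ny = false then
    if gridGet board nx ny == target then ((nx, ny) :: sv.1, visSet sv.2 nx ny) else sv
  else sv

def dfsStepA (board : List (List Int)) (target cx cy : Int)
    (sv : List (Int × Int) × List (List Bool)) : List (Int × Int) × List (List Bool) :=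
  [((0:Int), (-1:Int)), (0, 1), (-1, 0), (1, 0)].foldl
    (fun sv d => tryNbrA board target sv (cx + d.1) (cy + d.2)) sv

def dfsLoopA (board : List (List Int)) (target bx by_ : Int) :
    Nat → List (Int × Int) → List (List Bool) → List (Int × Int) →
    List (Int × Int) × List (List Bool)
  | 0, _, vis, block => (block, vis)
  | Nat.succ fuel, stack, vis, block =>
    match stack with
    | [] => (block, vis)
    | (cx, cy) :: rest =>
      let sv := dfsStepA board target cx cy (rest, vis)
      dfsLoopA board target bx by_ fuel sv.1 sv.2 (block ++ [(cx - bx, cy - by_)])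

def dfsA (board : List (List Int)) (target x y bx by_ : Int) (vis : List (List Bool)) :
    List (Int × Int) × List (List Bool) :=
  dfsLoopA board target bx by_ (board.length * board.length + 1) [(x, y)] (visSet vis x y) []

def rotFourA (vac : List (Int × Int)) : Nat → List (Int × Int) → Option Int
  | 0, _ => none
  | Nat.succ n, rotated =>
    let r := rotateA rotated
    if pyNormalize r = pyNormalize vac then some (r.length : Int) else rotFourA vac n r

def findMatchA : List (List (Int × Int)) → List (Int × Int) → Option (List (Int × Int) × Int)
  | [], _ => none
  | b :: rest, vac =>
    match rotFourA vac 4 b with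
    | some L => some (b, L)
    | none => findMatchA rest vac

def solution (game_board : List (List Int)) (table : List (List Int)) : Int :=
  let N : Int := (table.length : Int)
  let init : List (List Bool) := List.replicate table.length (List.replicate table.length false)
  let p1 := (PySem.List.pyRange 0 N 1).foldl (fun st i =>
      (PySem.List.pyRange 0 N 1).foldl (fun st j =>
        if gridGet table i j == 1 ∧ visGet st.1 i j = false then
          let r := dfsA table 1 i j i j st.1
          (r.2, st.2 ++ [pyNormalize r.1])
        else st) st)
    (init, ([] : List (List (Int × Int))))
  let p2 := (PySem.List.pyRange 0 N 1).foldl (fun st i =>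
      (PySem.List.pyRange 0 N 1).foldl (fun st j =>
        if gridGet game_board i j == 0 ∧ visGet st.1 i j = false then
          let r := dfsA game_board 0 i j i j st.1
          match findMatchA st.2.1 r.1 with
          | some bl => (r.2, ((PySem.List.remove? st.2.1 bl.1).getD st.2.1, st.2.2 + bl.2))
          | none => (r.2, st.2)
        else st) st)
    (init, (p1.2, (0 : Int)))
  p2.2.2

-- ===== PORT B =====
def pairLtB (p q : Int × Int) : Bool := p.1 < q.1 || (p.1 == q.1 && p.2 < q.2)

-- Python's `<` on lists of int pairs (hand port; exact: lexicographic, a strict prefix is smaller)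
def listLtB : List (Int × Int) → List (Int × Int) → Bool
  | [], [] => false
  | [], _ :: _ => true
  | _ :: _, [] => false
  | p :: ps, q :: qs => pairLtB p q || (p == q && listLtB ps qs)

def canonLoopB : Nat → List (Int × Int) → Option (List (Int × Int)) → Option (List (Int × Int))
  | 0, _, best => best
  | Nat.succ n, shape, best =>
    let shape' := shape.map (fun p => (-p.2, p.1))
    let ns := pyNormalize shape'
    let best' := match best with
      | none => some ns
      | some b => if listLtB ns b then some ns else some b
    canonLoopB n shape' best'

def canonB (shape : List (Int × Int)) : List (Int × Int) := (canonLoopB 4 shape none).getD []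

-- [v for row in board for v in row]
def flatB (board : List (List Int)) : List Int := board.flatten

-- neighbors(c): arithmetic guards on the flat index
def nbrsB (n c : Int) : List Int :=
  (if PySem.Int.mod c n ≠ 0 then [c - 1] else []) ++
  (if PySem.Int.mod c n ≠ n - 1 then [c + 1] else []) ++
  (if n ≤ c then [c - n] else []) ++
  (if c + n < n * n then [c + n] else [])

def growB (f : List Int) (target : Int) (st : List Int × PySem.Set Int) (m : Int) :
    List Int × PySem.Set Int :=
  if m ∉ st.2 ∧ PySem.List.pyGetD f m 0 = target then (m :: st.1, PySem.Set.add st.2 m) else st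

def floodB (f : List Int) (target n : Int) :
    Nat → List Int → PySem.Set Int → List (Int × Int) → List (Int × Int) × PySem.Set Int
  | 0, _, seen, cells => (cells, seen)
  | Nat.succ fuel, stack, seen, cells =>
    match stack with
    | [] => (cells, seen)
    | c :: rest =>
      let st := (nbrsB n c).foldl (growB f target) (rest, seen)
      floodB f target n fuel st.1 st.2
        (cells ++ [(PySem.Int.floordiv c n, PySem.Int.mod c n)])

def compsB (f : List Int) (n : Int) (fuel : Nat) (target : Int) : List (List (Int × Int)) :=
  ((PySem.List.pyRange 0 (n * n) 1).foldl (fun st k =>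
      if PySem.List.pyGetD f k 0 = target ∧ k ∉ st.1 then
        let r := floodB f target n fuel [k] (PySem.Set.add st.1 k) []
        (r.2, st.2 ++ [pyNormalize r.1])
      else st)
    ((PySem.Set.empty : PySem.Set Int), ([] : List (List (Int × Int))))).2

def solution_alt (game_board : List (List Int)) (table : List (List Int)) : Int :=
  let n : Int := (table.length : Int)
  let supply := (compsB (flatB table) n (table.length * table.length + 1) 1).foldl
    (fun d s => d.insert (canonB s) (d.getD (canonB s) 0 + 1))
    (PySem.Dict.empty : PySem.Dict (List (Int × Int)) Int)
  let r := (compsB (flatB game_board) n (game_board.length * game_board.length + 1) 0).foldl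
    (fun (st : PySem.Dict (List (Int × Int)) Int × Int) vac =>
      let key := canonB vac
      if st.1.getD key 0 > 0 then (st.1.insert key (st.1.getD key 0 - 1), st.2 + (vac.length : Int))
      else st)
    (supply, (0 : Int))
  r.2

-- ===== PRECONDITION & SPEC =====
-- Pre_ restricts to the problem's natural domain: two square boards of the same size N×N.
-- Outside it Python A either raises IndexError (ragged/non-square rows, or a game_board
-- smaller than the table) or scans game_board only over table-sized indices, an accident
-- of its implementation that B has no reason to reproduce.
def Pre_solution (game_board : List (List Int)) (table : List (List Int)) : Prop :=
  game_board.length = table.length ∧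
  (∀ r ∈ game_board, r.length = game_board.length) ∧
  (∀ r ∈ table, r.length = table.length)
instance (game_board : List (List Int)) (table : List (List Int)) :
    Decidable (Pre_solution game_board table) := by unfold Pre_solution; infer_instance

def pvWitness_solution : List (List Int) × List (List Int) := ([[0]], [[1]])

def Spec_solution (game_board : List (List Int)) (table : List (List Int)) (out : Int) : Prop :=
  out = solution_alt game_board table
instance (game_board : List (List Int)) (table : List (List Int)) (out : Int) :
    Decidable (Spec_solution game_board table out) := by unfold Spec_solution; infer_instance

-- ===== CLAIM (what is proved, stated in full; the proofs are below) =====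
def Claim_equal_solution : Prop := ∀ (game_board : List (List Int)) (table : List (List Int)), Dom_solution game_board table → Pre_solution game_board table → Spec_solution game_board table (solution game_board table)

-- ===== LEMMAS AND PROOFS =====

-- ==== the lexicographic order used by canonB ====

def plt (a b : Int × Int) : Bool :=
  decide (a.1 < b.1) || (!decide (b.1 < a.1) && decide (a.2 < b.2))

theorem plt_iff (a b : Int × Int) : plt a b = true ↔ a.1 < b.1 ∨ (a.1 = b.1 ∧ a.2 < b.2) := by
  simp [plt]; omega

theorem plt_asymm {a b : Int × Int} (h : plt a b = true) : plt b a = false := by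
  simp only [plt_iff] at h; by_contra hc
  simp only [Bool.not_eq_false, plt_iff] at hc; omega

theorem plt_trans {a b c : Int × Int} (h1 : plt a b = true) (h2 : plt b c = true) :
    plt a c = true := by
  simp only [plt_iff] at *; omega

theorem plt_conn {a b : Int × Int} (h1 : plt a b = false) (h2 : plt b a = false) : a = b := by
  rw [← Bool.not_eq_true, plt_iff] at h1 h2
  push_neg at h1 h2
  have : a.1 = b.1 ∧ a.2 = b.2 := by omega
  exact Prod.ext this.1 this.2

theorem pairLtB_eq_plt (p q : Int × Int) : pairLtB p q = plt p q := by
  simp only [pairLtB, plt]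
  by_cases h1 : p.1 < q.1 <;> by_cases h2 : q.1 < p.1 <;> by_cases h3 : p.1 = q.1 <;>
    simp [h1, h2, h3] <;> omega

theorem plt_irrefl (p : Int × Int) : plt p p = false := by
  by_contra hc
  simp only [Bool.not_eq_false] at hc
  simpa [hc] using plt_asymm hc

theorem llt_irrefl (x : List (Int × Int)) : listLtB x x = false := by
  induction x with
  | nil => rfl
  | cons p ps ih => simp [listLtB, ih, pairLtB_eq_plt, plt_irrefl]

theorem llt_asymm : ∀ {x y : List (Int × Int)}, listLtB x y = true → listLtB y x = false := by
  intro x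
  induction x with
  | nil => intro y h; cases y <;> simp_all [listLtB]
  | cons p ps ih =>
    intro y h
    cases y with
    | nil => simp_all [listLtB]
    | cons q qs =>
      simp only [listLtB, Bool.or_eq_true, Bool.and_eq_true, beq_iff_eq, pairLtB_eq_plt] at h ⊢
      rcases h with h | ⟨rfl, h⟩
      · simp only [Bool.or_eq_false_iff, Bool.and_eq_false_iff]
        refine ⟨plt_asymm h, Or.inl ?_⟩
        simp only [beq_eq_false_iff_ne, ne_eq]
        rintro rfl
        simp [plt_irrefl] at h
      · simp only [Bool.or_eq_false_iff, Bool.and_eq_false_iff]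
        exact ⟨plt_irrefl p, Or.inr (ih h)⟩

theorem llt_trans : ∀ {x y z : List (Int × Int)},
    listLtB x y = true → listLtB y z = true → listLtB x z = true := by
  intro x
  induction x with
  | nil => intro y z h1 h2; cases y <;> cases z <;> simp_all [listLtB]
  | cons p ps ih =>
    intro y z h1 h2
    cases y with
    | nil => simp_all [listLtB]
    | cons q qs =>
      cases z with
      | nil => simp_all [listLtB]
      | cons r rs =>
        simp only [listLtB, Bool.or_eq_true, Bool.and_eq_true, beq_iff_eq, pairLtB_eq_plt] at *
        rcases h1 with h1 | ⟨rfl, h1⟩ <;> rcases h2 with h2 | ⟨rfl, h2⟩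
        · exact Or.inl (plt_trans h1 h2)
        · exact Or.inl h1
        · exact Or.inl h2
        · exact Or.inr ⟨rfl, ih h1 h2⟩

theorem llt_conn : ∀ {x y : List (Int × Int)},
    listLtB x y = false → listLtB y x = false → x = y := by
  intro x
  induction x with
  | nil => intro y h1 _; cases y <;> simp_all [listLtB]
  | cons p ps ih =>
    intro y h1 h2
    cases y with
    | nil => simp_all [listLtB]
    | cons q qs =>
      simp only [listLtB, Bool.or_eq_false_iff, Bool.and_eq_false_iff, beq_iff_eq,
        pairLtB_eq_plt, beq_eq_false_iff_ne, ne_eq] at h1 h2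
      have hpq : p = q := plt_conn h1.1 h2.1
      subst hpq
      rcases h1.2 with h | h
      · exact absurd rfl h
      · rcases h2.2 with h' | h'
        · exact absurd rfl h'
        · rw [ih h h']

-- ==== pyNormalize: permutation invariance, shift invariance, idempotence ====

theorem s2_unfold (xs : List (Int × Int)) :
    PySem.List.sorted2 xs (·.1) (·.2) =
      xs.foldl (fun acc x => PySem.List.insertBy plt x acc) [] := rfl

theorem insertBy_pairwise_plt (x : Int × Int) (ys : List (Int × Int))
    (h : ys.Pairwise (fun a b => plt b a = false)) :
    (PySem.List.insertBy plt x ys).Pairwise (fun a b => plt b a = false) := by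
  induction ys with
  | nil => simp [PySem.List.insertBy]
  | cons y ys ih =>
    rw [List.pairwise_cons] at h
    by_cases hb : plt x y = true
    · show (if plt x y = true then x :: y :: ys else
        y :: PySem.List.insertBy plt x ys).Pairwise _
      rw [if_pos hb]
      refine List.Pairwise.cons ?_ (List.Pairwise.cons h.1 h.2)
      intro z hz
      rcases hz with _ | hz
      · exact plt_asymm hb
      · rename_i hz
        by_contra hc
        simp only [Bool.not_eq_false] at hc
        have := plt_trans hc hb
        have := h.1 z hz
        simp_all
    · show (if plt x y = true then x :: y :: ys else
        y :: PySem.List.insertBy plt x ys).Pairwise _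
      rw [if_neg hb]
      refine List.Pairwise.cons ?_ (ih h.2)
      intro z hz
      rw [PySem.List.insertBy_mem_iff] at hz
      rcases hz with rfl | hz
      · simpa using hb
      · exact h.1 z hz

theorem s2_pairwise (xs : List (Int × Int)) :
    (PySem.List.sorted2 xs (·.1) (·.2)).Pairwise (fun a b => plt b a = false) := by
  rw [s2_unfold]
  suffices h : ∀ acc : List (Int × Int), acc.Pairwise (fun a b => plt b a = false) →
      (xs.foldl (fun acc x => PySem.List.insertBy plt x acc) acc).Pairwise
        (fun a b => plt b a = false) from h [] (by simp)
  induction xs with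
  | nil => intro acc h; simpa using h
  | cons x xs ih => intro acc h; exact ih _ (insertBy_pairwise_plt x acc h)

theorem s2_congr {xs ys : List (Int × Int)} (h : xs.Perm ys) :
    PySem.List.sorted2 xs (·.1) (·.2) = PySem.List.sorted2 ys (·.1) (·.2) := by
  apply List.eq_of_perm_of_sorted (le := fun a b => plt b a = false)
  · intro a b _ _ h1 h2; exact (plt_conn h2 h1)
  · exact s2_pairwise xs
  · exact s2_pairwise ys
  · exact (PySem.List.sorted2_perm xs _ _ _).trans (h.trans (PySem.List.sorted2_perm ys _ _ _).symm)

theorem pyMin_spec {l : List Int} (h : l ≠ []) :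
    pyMinInt l ∈ l ∧ ∀ y ∈ l, pyMinInt l ≤ y := by
  rcases hm : PySem.List.min? l (fun v => v) with _ | m
  · exact absurd ((PySem.List.min?_eq_none_iff l _).mp hm) h
  · unfold pyMinInt
    rw [hm]
    exact ⟨PySem.List.min?_mem hm, fun y hy => PySem.List.min?_isMin hm y hy⟩

theorem pyMin_unique {l : List Int} {m : Int} (hmem : m ∈ l) (hlb : ∀ y ∈ l, m ≤ y) :
    pyMinInt l = m := by
  have hne : l ≠ [] := by rintro rfl; simp at hmem
  obtain ⟨h1, h2⟩ := pyMin_spec hne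
  exact le_antisymm (h2 m hmem) (hlb _ h1)

theorem pyMin_congr {l l' : List Int} (h : l.Perm l') : pyMinInt l = pyMinInt l' := by
  rcases eq_or_ne l [] with rfl | hne
  · rw [h.nil_eq.symm]
  · have hne' : l' ≠ [] := by intro hq; subst hq; exact hne h.eq_nil
    obtain ⟨h1, h2⟩ := pyMin_spec hne'
    exact pyMin_unique (h.mem_iff.mpr h1) (fun y hy => h2 y (h.mem_iff.mp hy)) |>.symm
      |>.trans rfl |>.symm

theorem pyMin_shift {l : List Int} (h : l ≠ []) (c : Int) :
    pyMinInt (l.map (· + c)) = pyMinInt l + c := by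
  obtain ⟨h1, h2⟩ := pyMin_spec h
  exact pyMin_unique (List.mem_map_of_mem h1)
    (by rintro y hy; obtain ⟨x, hx, rfl⟩ := List.mem_map.mp hy; exact by linarith [h2 x hx])

theorem norm_perm {a b : List (Int × Int)} (h : a.Perm b) : pyNormalize a = pyNormalize b := by
  rcases eq_or_ne a [] with rfl | hne
  · rw [h.nil_eq.symm]
  · unfold pyNormalize
    rw [pyMin_congr (h.map (·.1)), pyMin_congr (h.map (·.2))]
    exact s2_congr (h.map _)

theorem norm_perm_translate (l : List (Int × Int)) :
    (pyNormalize l).Perm (l.map (fun p =>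
      (p.1 - pyMinInt (l.map (·.1)), p.2 - pyMinInt (l.map (·.2))))) := by
  unfold pyNormalize
  exact PySem.List.sorted2_perm _ _ _ _

theorem norm_length (l : List (Int × Int)) : (pyNormalize l).length = l.length := by
  rw [(norm_perm_translate l).length_eq, List.length_map]

theorem norm_shift {l : List (Int × Int)} (h : l ≠ []) (a b : Int) :
    pyNormalize (l.map (fun p => (p.1 + a, p.2 + b))) = pyNormalize l := by
  have hf : (l.map (fun p => (p.1 + a, p.2 + b))).map (·.1) = (l.map (·.1)).map (· + a) := by
    simp [List.map_map]
  have hs : (l.map (fun p => (p.1 + a, p.2 + b))).map (·.2) = (l.map (·.2)).map (· + b) := by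
    simp [List.map_map]
  have hf' : l.map (·.1) ≠ [] := by simpa using h
  have hs' : l.map (·.2) ≠ [] := by simpa using h
  unfold pyNormalize
  simp only []
  rw [hf, hs, pyMin_shift hf' a, pyMin_shift hs' b]
  congr 1
  rw [List.map_map]
  apply List.map_congr_left
  intro p _
  simp only [Function.comp]
  refine Prod.ext ?_ ?_ <;> dsimp <;> ring

theorem norm_idem (l : List (Int × Int)) : pyNormalize (pyNormalize l) = pyNormalize l := by
  rcases eq_or_ne l [] with rfl | hne
  · rfl
  · have h1 := norm_perm (norm_perm_translate l)
    rw [h1]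
    have : l.map (fun p => (p.1 - pyMinInt (l.map (·.1)), p.2 - pyMinInt (l.map (·.2)))) =
        l.map (fun p => (p.1 + (-pyMinInt (l.map (·.1))), p.2 + (-pyMinInt (l.map (·.2))))) := by
      apply List.map_congr_left; intro p _; refine Prod.ext ?_ ?_ <;> dsimp <;> ring
    rw [this, norm_shift hne]

-- ==== the four-rotation orbit and canonB ====

theorem rot4_id (l : List (Int × Int)) : rotateA (rotateA (rotateA (rotateA l))) = l := by
  simp only [rotateA, List.map_map]
  have : ((fun p : Int × Int => (-p.2, p.1)) ∘ (fun p : Int × Int => (-p.2, p.1)) ∘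
      (fun p : Int × Int => (-p.2, p.1)) ∘ (fun p : Int × Int => (-p.2, p.1))) = id := by
    funext p; simp
  rw [this, List.map_id]

theorem rot_norm (l : List (Int × Int)) :
    pyNormalize (rotateA (pyNormalize l)) = pyNormalize (rotateA l) := by
  rcases eq_or_ne l [] with rfl | hne
  · rfl
  · have h1 : (rotateA (pyNormalize l)).Perm (rotateA (l.map (fun p =>
        (p.1 - pyMinInt (l.map (·.1)), p.2 - pyMinInt (l.map (·.2)))))) :=
      (norm_perm_translate l).map _
    rw [norm_perm h1]
    have h2 : rotateA (l.map (fun p =>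
        (p.1 - pyMinInt (l.map (·.1)), p.2 - pyMinInt (l.map (·.2))))) =
        (rotateA l).map (fun q => (q.1 + pyMinInt (l.map (·.2)), q.2 + (-pyMinInt (l.map (·.1))))) := by
      simp only [rotateA, List.map_map]
      apply List.map_congr_left; intro p _
      simp only [Function.comp]
      refine Prod.ext ?_ ?_ <;> dsimp <;> ring
    rw [h2, norm_shift (by simpa [rotateA] using hne)]

def lmin (a b : List (Int × Int)) : List (Int × Int) := if listLtB b a then b else a

def nr1 (s : List (Int × Int)) : List (Int × Int) := pyNormalize (rotateA s)

def nr2 (s : List (Int × Int)) : List (Int × Int) := pyNormalize (rotateA (rotateA s))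

def nr3 (s : List (Int × Int)) : List (Int × Int) := pyNormalize (rotateA (rotateA (rotateA s)))

def nr4 (s : List (Int × Int)) : List (Int × Int) :=
  pyNormalize (rotateA (rotateA (rotateA (rotateA s))))

theorem canonLoop_none (n : Nat) (shape : List (Int × Int)) :
    canonLoopB (n + 1) shape none =
      canonLoopB n (rotateA shape) (some (pyNormalize (rotateA shape))) := rfl

theorem canonLoop_some (n : Nat) (shape b : List (Int × Int)) :
    canonLoopB (n + 1) shape (some b) =
      canonLoopB n (rotateA shape) (some (lmin b (pyNormalize (rotateA shape)))) := by
  show canonLoopB (n + 1) shape (some b) = _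
  simp only [canonLoopB, rotateA, lmin]
  congr 1
  split <;> rfl

theorem canon_eq (s : List (Int × Int)) :
    canonB s = lmin (lmin (lmin (nr1 s) (nr2 s)) (nr3 s)) (nr4 s) := by
  show (canonLoopB 4 s none).getD [] = _
  rw [show (4 : Nat) = 3 + 1 from rfl, canonLoop_none, show (3 : Nat) = 2 + 1 from rfl,
    canonLoop_some, show (2 : Nat) = 1 + 1 from rfl, canonLoop_some, canonLoop_some]
  rfl

theorem lmin_or (a b : List (Int × Int)) : lmin a b = a ∨ lmin a b = b := by
  unfold lmin; split <;> simp

theorem lmin_le_left (a b : List (Int × Int)) : listLtB a (lmin a b) = false := by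
  unfold lmin; split
  · rename_i h; exact llt_asymm h
  · exact llt_irrefl a

theorem lmin_le_right (a b : List (Int × Int)) : listLtB b (lmin a b) = false := by
  unfold lmin; split
  · exact llt_irrefl b
  · rename_i h; simpa using h

theorem llt_min_mono {x m : List (Int × Int)} (h : listLtB x m = false) (y : List (Int × Int)) :
    listLtB x (lmin m y) = false := by
  rcases lmin_or m y with he | he
  · rw [he]; exact h
  · rw [he]
    by_contra hc
    simp only [Bool.not_eq_false] at hc
    unfold lmin at he
    split at he
    · rename_i hlt
      have := llt_trans hc hlt
      simp_all
    · subst he; simp_all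

theorem canon_mem (s : List (Int × Int)) :
    canonB s = nr1 s ∨ canonB s = nr2 s ∨ canonB s = nr3 s ∨ canonB s = nr4 s := by
  rw [canon_eq]
  rcases lmin_or (lmin (lmin (nr1 s) (nr2 s)) (nr3 s)) (nr4 s) with h | h <;> rw [h]
  · rcases lmin_or (lmin (nr1 s) (nr2 s)) (nr3 s) with h2 | h2 <;> rw [h2]
    · rcases lmin_or (nr1 s) (nr2 s) with h3 | h3 <;> rw [h3] <;> simp
    · simp
  · simp

theorem canon_min {s x : List (Int × Int)}
    (hx : x = nr1 s ∨ x = nr2 s ∨ x = nr3 s ∨ x = nr4 s) :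
    listLtB x (canonB s) = false := by
  rw [canon_eq]
  rcases hx with rfl | rfl | rfl | rfl
  · exact llt_min_mono (llt_min_mono (lmin_le_left _ _) _) _
  · exact llt_min_mono (llt_min_mono (lmin_le_right _ _) _) _
  · exact llt_min_mono (lmin_le_right _ _) _
  · exact lmin_le_right _ _

def mem4 (x s : List (Int × Int)) : Prop := x = nr1 s ∨ x = nr2 s ∨ x = nr3 s ∨ x = nr4 s

theorem fn1 (s : List (Int × Int)) : pyNormalize (rotateA (nr1 s)) = nr2 s := rot_norm (rotateA s)

theorem fn2 (s : List (Int × Int)) : pyNormalize (rotateA (nr2 s)) = nr3 s :=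
  rot_norm (rotateA (rotateA s))

theorem fn3 (s : List (Int × Int)) : pyNormalize (rotateA (nr3 s)) = nr4 s :=
  rot_norm (rotateA (rotateA (rotateA s)))

theorem fn4 (s : List (Int × Int)) : pyNormalize (rotateA (nr4 s)) = nr1 s := by
  have h := rot_norm (rotateA (rotateA (rotateA (rotateA s))))
  rw [show rotateA (rotateA (rotateA (rotateA (rotateA s)))) = rotateA s from by
    rw [rot4_id]] at h
  exact h

theorem nr4_eq_norm (s : List (Int × Int)) : nr4 s = pyNormalize s := by
  unfold nr4; rw [rot4_id]

theorem cyc_mem {x s : List (Int × Int)} (h : mem4 x s) : mem4 (pyNormalize (rotateA x)) s := by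
  rcases h with rfl | rfl | rfl | rfl
  · exact Or.inr (Or.inl (fn1 s))
  · exact Or.inr (Or.inr (Or.inl (fn2 s)))
  · exact Or.inr (Or.inr (Or.inr (fn3 s)))
  · exact Or.inl (fn4 s)

theorem orbit_forward {s w : List (Int × Int)} (h : canonB s = canonB w) :
    mem4 (pyNormalize w) s := by
  have hs : mem4 (canonB s) s := canon_mem s
  have hw : mem4 (canonB s) w := h ▸ canon_mem w
  rcases hw with hj | hj | hj | hj
  · have h2 := cyc_mem hs
    rw [hj, fn1] at h2
    have h3 := cyc_mem h2
    rw [fn2] at h3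
    have h4 := cyc_mem h3
    rw [fn3, nr4_eq_norm] at h4
    exact h4
  · have h3 := cyc_mem hs
    rw [hj, fn2] at h3
    have h4 := cyc_mem h3
    rw [fn3, nr4_eq_norm] at h4
    exact h4
  · have h4 := cyc_mem hs
    rw [hj, fn3, nr4_eq_norm] at h4
    exact h4
  · rw [← nr4_eq_norm, ← hj]
    exact hs

theorem orbit_backward {s w : List (Int × Int)} (h : mem4 (pyNormalize w) s) :
    canonB s = canonB w := by
  have h4w : mem4 (nr4 w) s := by rw [nr4_eq_norm]; exact h
  have h1w : mem4 (nr1 w) s := by have := cyc_mem h4w; rwa [fn4] at this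
  have h2w : mem4 (nr2 w) s := by have := cyc_mem h1w; rwa [fn1] at this
  have h3w : mem4 (nr3 w) s := by have := cyc_mem h2w; rwa [fn2] at this
  have hsub : mem4 (nr1 s) w ∧ mem4 (nr2 s) w ∧ mem4 (nr3 s) w ∧ mem4 (nr4 s) w := by
    rcases h with hi | hi | hi | hi
    · have a1 : mem4 (nr1 s) w := by
        rw [← hi, ← nr4_eq_norm]; exact Or.inr (Or.inr (Or.inr rfl))
      have a2 : mem4 (nr2 s) w := by have := cyc_mem a1; rwa [fn1] at this
      have a3 : mem4 (nr3 s) w := by have := cyc_mem a2; rwa [fn2] at this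
      have a4 : mem4 (nr4 s) w := by have := cyc_mem a3; rwa [fn3] at this
      exact ⟨a1, a2, a3, a4⟩
    · have a2 : mem4 (nr2 s) w := by
        rw [← hi, ← nr4_eq_norm]; exact Or.inr (Or.inr (Or.inr rfl))
      have a3 : mem4 (nr3 s) w := by have := cyc_mem a2; rwa [fn2] at this
      have a4 : mem4 (nr4 s) w := by have := cyc_mem a3; rwa [fn3] at this
      have a1 : mem4 (nr1 s) w := by have := cyc_mem a4; rwa [fn4] at this
      exact ⟨a1, a2, a3, a4⟩
    · have a3 : mem4 (nr3 s) w := by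
        rw [← hi, ← nr4_eq_norm]; exact Or.inr (Or.inr (Or.inr rfl))
      have a4 : mem4 (nr4 s) w := by have := cyc_mem a3; rwa [fn3] at this
      have a1 : mem4 (nr1 s) w := by have := cyc_mem a4; rwa [fn4] at this
      have a2 : mem4 (nr2 s) w := by have := cyc_mem a1; rwa [fn1] at this
      exact ⟨a1, a2, a3, a4⟩
    · have a4 : mem4 (nr4 s) w := by
        rw [← hi, ← nr4_eq_norm]; exact Or.inr (Or.inr (Or.inr rfl))
      have a1 : mem4 (nr1 s) w := by have := cyc_mem a4; rwa [fn4] at this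
      have a2 : mem4 (nr2 s) w := by have := cyc_mem a1; rwa [fn1] at this
      have a3 : mem4 (nr3 s) w := by have := cyc_mem a2; rwa [fn2] at this
      exact ⟨a1, a2, a3, a4⟩
  have hcs : mem4 (canonB s) w := by
    rcases canon_mem s with hc | hc | hc | hc <;> rw [hc]
    · exact hsub.1
    · exact hsub.2.1
    · exact hsub.2.2.1
    · exact hsub.2.2.2
  have hws : mem4 (canonB w) s := by
    rcases canon_mem w with hc | hc | hc | hc <;> rw [hc]
    · exact h1w
    · exact h2w
    · exact h3w
    · exact h4w
  exact llt_conn (canon_min hcs) (canon_min hws)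

theorem canon_norm (w : List (Int × Int)) : canonB (pyNormalize w) = canonB w :=
  orbit_backward (Or.inr (Or.inr (Or.inr (by rw [nr4_eq_norm, norm_idem]))))

theorem len_rot (x : List (Int × Int)) : (rotateA x).length = x.length := List.length_map ..

theorem rotFour_canon (vac b : List (Int × Int)) :
    rotFourA vac 4 b =
      if canonB b = canonB vac then some ((b.length : Int)) else none := by
  have e1 : rotFourA vac 4 b = if nr1 b = pyNormalize vac then some ((b.length : Int))
      else rotFourA vac 3 (rotateA b) := by
    rw [show (4 : Nat) = 3 + 1 from rfl]
    show (if pyNormalize (rotateA b) = pyNormalize vac then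
        some (((rotateA b).length : Int)) else rotFourA vac 3 (rotateA b)) = _
    rw [len_rot]; rfl
  have e2 : rotFourA vac 3 (rotateA b) = if nr2 b = pyNormalize vac then some ((b.length : Int))
      else rotFourA vac 2 (rotateA (rotateA b)) := by
    rw [show (3 : Nat) = 2 + 1 from rfl]
    show (if pyNormalize (rotateA (rotateA b)) = pyNormalize vac then
        some (((rotateA (rotateA b)).length : Int)) else _) = _
    rw [len_rot, len_rot]; rfl
  have e3 : rotFourA vac 2 (rotateA (rotateA b)) =
      if nr3 b = pyNormalize vac then some ((b.length : Int))
      else rotFourA vac 1 (rotateA (rotateA (rotateA b))) := by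
    rw [show (2 : Nat) = 1 + 1 from rfl]
    show (if pyNormalize (rotateA (rotateA (rotateA b))) = pyNormalize vac then
        some (((rotateA (rotateA (rotateA b))).length : Int)) else _) = _
    rw [len_rot, len_rot, len_rot]; rfl
  have e4 : rotFourA vac 1 (rotateA (rotateA (rotateA b))) =
      if nr4 b = pyNormalize vac then some ((b.length : Int)) else none := by
    rw [show (1 : Nat) = 0 + 1 from rfl]
    show (if pyNormalize (rotateA (rotateA (rotateA (rotateA b)))) = pyNormalize vac then
        some (((rotateA (rotateA (rotateA (rotateA b)))).length : Int)) else none) = _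
    rw [len_rot, len_rot, len_rot, len_rot]; rfl
  rw [e1, e2, e3, e4]
  by_cases hc : canonB b = canonB vac
  · rw [if_pos hc]
    split_ifs with h1 h2 h3 h4
    · rfl
    · rfl
    · rfl
    · rfl
    · exfalso
      rcases orbit_forward hc with hm | hm | hm | hm
      exacts [h1 hm.symm, h2 hm.symm, h3 hm.symm, h4 hm.symm]
  · rw [if_neg hc]
    split_ifs with h1 h2 h3 h4
    · exact absurd (orbit_backward (Or.inl h1.symm)) hc
    · exact absurd (orbit_backward (Or.inr (Or.inl h2.symm))) hc
    · exact absurd (orbit_backward (Or.inr (Or.inr (Or.inl h3.symm)))) hc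
    · exact absurd (orbit_backward (Or.inr (Or.inr (Or.inr h4.symm)))) hc
    · rfl

theorem len_of_mem4 {x b : List (Int × Int)} (h : mem4 x b) : x.length = b.length := by
  rcases h with rfl | rfl | rfl | rfl <;>
    simp [nr1, nr2, nr3, nr4, norm_length, len_rot]

theorem findMatch_some {blocks : List (List (Int × Int))} {vac : List (Int × Int)}
    {bl : List (Int × Int) × Int} (h : findMatchA blocks vac = some bl) :
    canonB bl.1 = canonB vac ∧ bl.1 ∈ blocks ∧ bl.2 = (bl.1.length : Int) ∧
      bl.1.length = vac.length := by
  induction blocks with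
  | nil => simp [findMatchA] at h
  | cons b rest ih =>
    rw [show findMatchA (b :: rest) vac = (match rotFourA vac 4 b with
      | some L => some (b, L)
      | none => findMatchA rest vac) from rfl, rotFour_canon] at h
    by_cases hc : canonB b = canonB vac
    · rw [if_pos hc] at h
      obtain rfl : bl = (b, (b.length : Int)) := by simpa using h.symm
      refine ⟨hc, by simp, rfl, ?_⟩
      have hmem := orbit_forward hc
      have := len_of_mem4 hmem
      rw [norm_length] at this
      exact this.symm
    · rw [if_neg hc] at h
      obtain ⟨h1, h2, h3, h4⟩ := ih h
      exact ⟨h1, by simp [h2], h3, h4⟩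

theorem findMatch_isSome {blocks : List (List (Int × Int))} {vac : List (Int × Int)}
    (h : ∃ b ∈ blocks, canonB b = canonB vac) : (findMatchA blocks vac).isSome := by
  induction blocks with
  | nil => simp at h
  | cons b rest ih =>
    show (match rotFourA vac 4 b with
      | some L => some (b, L)
      | none => findMatchA rest vac).isSome
    rw [rotFour_canon]
    by_cases hc : canonB b = canonB vac
    · simp [hc]
    · rcases h with ⟨b', hb', hc'⟩
      rcases List.mem_cons.mp hb' with rfl | hb'
      · exact absurd hc' hc
      · simpa [hc] using ih ⟨b', hb', hc'⟩

theorem countP_erase_add {α : Type} [BEq α] [LawfulBEq α] (p : α → Bool) {l : List α} {a : α}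
    (ha : a ∈ l) : l.countP p = (l.erase a).countP p + (if p a then 1 else 0) := by
  obtain ⟨l₁, l₂, _, rfl, he⟩ := List.exists_erase_eq ha
  rw [he]
  simp [List.countP_append, List.countP_cons]
  split_ifs <;> omega

-- ==== index arithmetic for the flattened board ====

theorem pyGetD_nonneg_getD {α : Type} (xs : List α) (i : Int) (d : α) (h : 0 ≤ i) :
    PySem.List.pyGetD xs i d = xs.getD i.toNat d := by
  have := PySem.List.pyGetD_natCast (xs := xs) (n := i.toNat) (d := d)
  rwa [Int.toNat_of_nonneg h] at this

theorem getD_set' {α : Type} (l : List α) (i : Nat) (a : α) (j : Nat) (d : α) :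
    (l.set i a).getD j d = if i = j ∧ i < l.length then a else l.getD j d := by
  rw [List.getD_eq_getElem?_getD, List.getD_eq_getElem?_getD, List.getElem?_set]
  by_cases h1 : i = j
  · subst h1
    by_cases h2 : i < l.length <;> simp [h2, List.getElem?_eq_none, Nat.le_of_not_lt]
  · simp [h1]

theorem dec_enc {n x y : Int} (hy : 0 ≤ y) (hy2 : y < n) :
    PySem.Int.floordiv (x * n + y) n = x ∧ PySem.Int.mod (x * n + y) n = y := by
  have hn : 0 < n := lt_of_le_of_lt hy hy2
  have h1 : PySem.Int.floordiv (x * n + y) n = x := by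
    rw [PySem.Int.floordiv_eq_iff_of_pos hn]
    constructor
    · linarith
    · nlinarith
  refine ⟨h1, ?_⟩
  have h2 := PySem.Int.floordiv_mul_add_mod (x * n + y) n
  rw [h1] at h2
  linarith

theorem enc_inj {n x y x' y' : Int} (hx : 0 ≤ x) (hx2 : x < n) (hy : 0 ≤ y) (hy2 : y < n)
    (hx' : 0 ≤ x') (hx2' : x' < n) (hy' : 0 ≤ y') (hy2' : y' < n)
    (h : x * n + y = x' * n + y') : x = x' ∧ y = y' := by
  have h1 := (dec_enc (x := x) hy hy2).2
  have h2 := (dec_enc (x := x') hy' hy2').2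
  rw [h] at h1
  have hyy : y = y' := by rw [h1] at h2; exact h2
  have hn : 0 < n := lt_of_le_of_lt hy hy2
  constructor
  · have : x * n = x' * n := by linarith
    exact mul_right_cancel₀ (ne_of_gt hn) this
  · exact hyy

theorem pyGetD_append_left {α : Type} (pre ys : List α) (i : Int) (d : α)
    (h0 : 0 ≤ i) (h1 : i < (pre.length : Int)) :
    PySem.List.pyGetD (pre ++ ys) i d = PySem.List.pyGetD pre i d := by
  rw [pyGetD_nonneg_getD _ _ _ h0, pyGetD_nonneg_getD _ _ _ h0]
  have hlt : i.toNat < pre.length := by omega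
  rw [List.getD_eq_getElem?_getD, List.getD_eq_getElem?_getD,
    List.getElem?_append_left hlt]

theorem pyGetD_append_right' {α : Type} (pre ys : List α) (i : Int) (d : α) (h0 : 0 ≤ i) :
    PySem.List.pyGetD (pre ++ ys) ((pre.length : Int) + i) d = PySem.List.pyGetD ys i d := by
  rw [pyGetD_nonneg_getD (pre ++ ys) ((pre.length : Int) + i) d (by omega),
    pyGetD_nonneg_getD ys i d h0]
  have ht : ((pre.length : Int) + i).toNat = pre.length + i.toNat := by omega
  rw [ht, List.getD_eq_getElem?_getD, List.getD_eq_getElem?_getD,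
    List.getElem?_append_right (Nat.le_add_right pre.length i.toNat)]
  congr 2
  omega

theorem flat_get_aux (rows : List (List Int)) (L : Nat) (hr : ∀ r ∈ rows, r.length = L) :
    ∀ x y : Int, 0 ≤ x → x < (rows.length : Int) → 0 ≤ y → y < (L : Int) →
    PySem.List.pyGetD rows.flatten (x * (L : Int) + y) 0 =
      PySem.List.pyGetD (PySem.List.pyGetD rows x []) y 0 := by
  induction rows with
  | nil => intro x y h1 h2 _ _; simp at h2; omega
  | cons r rows ih =>
    intro x y hx hx2 hy hy2
    have hrl : r.length = L := hr r (by simp)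
    by_cases h0 : x = 0
    · subst h0
      rw [List.flatten_cons]
      rw [show (0 : Int) * (L : Int) + y = y by ring]
      rw [pyGetD_append_left _ _ _ _ hy (by rw [hrl]; exact hy2)]
      rw [show PySem.List.pyGetD (r :: rows) 0 [] = r from PySem.List.pyGetD_zero_cons ..]
    · have hx1 : 1 ≤ x := by omega
      rw [List.flatten_cons]
      have harith : x * (L : Int) + y = (r.length : Int) + ((x - 1) * (L : Int) + y) := by
        rw [hrl]; ring
      rw [harith, pyGetD_append_right' _ _ _ _ (by nlinarith)]
      rw [ih (fun r hm => hr r (by simp [hm])) (x - 1) y (by omega)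
        (by simp at hx2 ⊢; omega) hy hy2]
      congr 1
      rw [pyGetD_nonneg_getD _ _ _ hx, pyGetD_nonneg_getD _ _ _ (by omega)]
      have : x.toNat = (x - 1).toNat + 1 := by omega
      rw [this]
      rfl

-- ==== simulation relation between A's 2-D visited matrix and B's flat seen set ====

def inR (n : Int) (p : Int × Int) : Prop := 0 ≤ p.1 ∧ p.1 < n ∧ 0 ≤ p.2 ∧ p.2 < n

def WFv (L : Nat) (vis : List (List Bool)) : Prop :=
  vis.length = L ∧ ∀ i, i < vis.length → (vis.getD i []).length = L

def Rvis (n : Int) (vis : List (List Bool)) (seen : PySem.Set Int) : Prop :=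
  ∀ x y : Int, 0 ≤ x → x < n → 0 ≤ y → y < n →
    (visGet vis x y = true ↔ (x * n + y) ∈ seen)

def relSt (L : Nat) (n : Int) (a : List (Int × Int) × List (List Bool))
    (b : List Int × PySem.Set Int) : Prop :=
  b.1 = a.1.map (fun p => p.1 * n + p.2) ∧ (∀ p ∈ a.1, inR n p) ∧
    WFv L a.2 ∧ Rvis n a.2 b.2

theorem visGet_getD (vis : List (List Bool)) (x y : Int) (hx : 0 ≤ x) (hy : 0 ≤ y) :
    visGet vis x y = (vis.getD x.toNat []).getD y.toNat false := by
  unfold visGet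
  rw [pyGetD_nonneg_getD _ _ _ hx, pyGetD_nonneg_getD _ _ _ hy]

theorem visSet_eq (vis : List (List Bool)) (x y : Int) (hx : 0 ≤ x) (hy : 0 ≤ y) :
    visSet vis x y = vis.set x.toNat ((vis.getD x.toNat []).set y.toNat true) := by
  unfold visSet
  rw [PySem.List.pySetD_of_nonneg _ _ hx, PySem.List.pySetD_of_nonneg _ _ hy,
    pyGetD_nonneg_getD _ _ _ hx]

theorem WFv_visSet {L : Nat} {vis : List (List Bool)} (hWF : WFv L vis) {x y : Int}
    (hx : 0 ≤ x) (hy : 0 ≤ y) : WFv L (visSet vis x y) := by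
  rw [visSet_eq vis x y hx hy]
  obtain ⟨hlen, hrows⟩ := hWF
  refine ⟨by simpa using hlen, ?_⟩
  intro i hi
  rw [List.length_set] at hi
  rw [getD_set']
  split_ifs with h
  · rw [List.length_set]
    exact hrows x.toNat (by omega)
  · exact hrows i hi

theorem visGet_visSet {L : Nat} {vis : List (List Bool)} (hWF : WFv L vis)
    {x y x' y' : Int} (hx : 0 ≤ x) (hx2 : x.toNat < L) (hy : 0 ≤ y) (hy2 : y.toNat < L)
    (hx' : 0 ≤ x') (hy' : 0 ≤ y') :
    visGet (visSet vis x y) x' y' =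
      if x' = x ∧ y' = y then true else visGet vis x' y' := by
  obtain ⟨hlen, hrows⟩ := hWF
  rw [visGet_getD _ _ _ hx' hy', visGet_getD _ _ _ hx' hy', visSet_eq vis x y hx hy]
  rw [getD_set']
  by_cases hxx : x' = x
  · subst hxx
    rw [if_pos ⟨rfl, by omega⟩]
    rw [getD_set']
    by_cases hyy : y' = y
    · subst hyy
      rw [if_pos ⟨rfl, by rw [hrows x'.toNat (by omega)]; omega⟩, if_pos ⟨rfl, rfl⟩]
    · rw [if_neg (by intro hc; exact hyy (by omega)), if_neg (by intro hc; exact hyy hc.2)]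
  · rw [if_neg (by intro hc; exact hxx (by omega)), if_neg (by intro hc; exact hxx hc.1)]

theorem Rvis_visSet {L : Nat} {n : Int} {vis : List (List Bool)} {seen : PySem.Set Int}
    (hL : (L : Int) = n) (hWF : WFv L vis) (hR : Rvis n vis seen)
    {x y : Int} (hx : 0 ≤ x) (hx2 : x < n) (hy : 0 ≤ y) (hy2 : y < n) :
    Rvis n (visSet vis x y) (PySem.Set.add seen (x * n + y)) := by
  intro x' y' hx' hx2' hy' hy2'
  rw [visGet_visSet hWF hx (by omega) hy (by omega) hx' hy']
  rw [PySem.Set.mem_add]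
  by_cases he : x' = x ∧ y' = y
  · rw [if_pos he]
    simp [he.1, he.2]
  · rw [if_neg he]
    rw [hR x' y' hx' hx2' hy' hy2']
    constructor
    · exact fun h => Or.inl h
    · rintro (h | h)
      · exact h
      · exact absurd (enc_inj hx' hx2' hy' hy2' hx hx2 hy hy2 h) he

-- one candidate neighbour, inside the grid: A's bounded try matches B's grow
theorem tryRel_in {board : List (List Int)} {f : List Int} {target n : Int} {L : Nat}
    (hL : (L : Int) = n) (hb : board.length = L)
    (hflat : ∀ x y : Int, 0 ≤ x → x < n → 0 ≤ y → y < n →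
      PySem.List.pyGetD f (x * n + y) 0 = gridGet board x y)
    {sA : List (Int × Int)} {vis : List (List Bool)} {sB : List Int} {seen : PySem.Set Int}
    (hrel : relSt L n (sA, vis) (sB, seen)) {nx ny : Int} (h : inR n (nx, ny)) :
    relSt L n (tryNbrA board target (sA, vis) nx ny)
      (growB f target (sB, seen) (nx * n + ny)) := by
  obtain ⟨hmap, hinv, hWF, hR⟩ := hrel
  obtain ⟨h1, h2, h3, h4⟩ := h
  try dsimp only at hmap hinv hWF hR h1 h2 h3 h4
  have hbI : (board.length : Int) = n := by rw [hb]; exact hL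
  have hbnd : 0 ≤ nx ∧ nx < (board.length : Int) ∧ 0 ≤ ny ∧ ny < (board.length : Int) := by
    rw [hbI]; exact ⟨h1, h2, h3, h4⟩
  have hmemiff := hR nx ny h1 h2 h3 h4
  unfold tryNbrA growB
  by_cases hv : visGet vis nx ny = false
  · rw [if_pos ⟨hbnd.1, hbnd.2.1, hbnd.2.2.1, hbnd.2.2.2, hv⟩]
    have hnm : (nx * n + ny) ∉ seen := by
      intro hc
      rw [← hmemiff] at hc
      simp [hc] at hv
    by_cases hg : gridGet board nx ny = target
    · rw [if_pos (by simpa using hg), if_pos ⟨hnm, by rw [hflat nx ny h1 h2 h3 h4]; exact hg⟩]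
      refine ⟨by simp [hmap], ?_, WFv_visSet hWF h1 h3, ?_⟩
      · intro p hp
        rcases List.mem_cons.mp hp with rfl | hp
        · exact ⟨h1, h2, h3, h4⟩
        · exact hinv p hp
      · exact Rvis_visSet hL hWF hR h1 h2 h3 h4
    · rw [if_neg (by simpa using hg),
        if_neg (by intro hc; exact hg (by rw [← hflat nx ny h1 h2 h3 h4]; exact hc.2))]
      exact ⟨hmap, hinv, hWF, hR⟩
  · rw [if_neg (by intro hc; exact hv hc.2.2.2.2)]
    have hv' : visGet vis nx ny = true := by
      cases hq : visGet vis nx ny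
      · exact absurd hq hv
      · rfl
    rw [if_neg (by intro hc; exact hc.1 (hmemiff.mp hv'))]
    exact ⟨hmap, hinv, hWF, hR⟩

-- a candidate outside the grid: A's try is a no-op
theorem tryNbrA_out {board : List (List Int)} {target n : Int}
    (hbI : (board.length : Int) = n)
    (sv : List (Int × Int) × List (List Bool)) {nx ny : Int} (h : ¬ inR n (nx, ny)) :
    tryNbrA board target sv nx ny = sv := by
  unfold tryNbrA
  rw [if_neg]
  intro hc
  exact h ⟨hc.1, by rw [← hbI]; exact hc.2.1, hc.2.2.1, by rw [← hbI]; exact hc.2.2.2.1⟩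

theorem stepRel {board : List (List Int)} {f : List Int} {target n : Int} {L : Nat}
    (hL : (L : Int) = n) (hb : board.length = L)
    (hflat : ∀ x y : Int, 0 ≤ x → x < n → 0 ≤ y → y < n →
      PySem.List.pyGetD f (x * n + y) 0 = gridGet board x y)
    {sA : List (Int × Int)} {vis : List (List Bool)} {sB : List Int} {seen : PySem.Set Int}
    (hrel : relSt L n (sA, vis) (sB, seen)) {cx cy : Int} (hc : inR n (cx, cy)) :
    relSt L n (dfsStepA board target cx cy (sA, vis))
      ((nbrsB n (cx * n + cy)).foldl (growB f target) (sB, seen)) := by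
  obtain ⟨hcx, hcx2, hcy, hcy2⟩ := hc
  try dsimp only at hcx hcx2 hcy hcy2
  have hn : 0 < n := lt_of_le_of_lt hcx hcx2
  have hbI : (board.length : Int) = n := by rw [hb]; exact hL
  have hmod : PySem.Int.mod (cx * n + cy) n = cy := (dec_enc hcy hcy2).2
  -- unfold both steps into four sequential candidates
  have hstep : dfsStepA board target cx cy (sA, vis) =
      tryNbrA board target
        (tryNbrA board target
          (tryNbrA board target
            (tryNbrA board target (sA, vis) cx (cy - 1)) cx (cy + 1)) (cx - 1) cy) (cx + 1) cy := by
    show dfsStepA board target cx cy (sA, vis) = _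
    simp only [dfsStepA, List.foldl_cons, List.foldl_nil]
    simp only [show cy + (-1 : Int) = cy - 1 from by ring,
      show cx + (-1 : Int) = cx - 1 from by ring,
      show cx + (0 : Int) = cx from by ring, show cy + (0 : Int) = cy from by ring]
  rw [hstep]
  unfold nbrsB
  rw [List.foldl_append, List.foldl_append, List.foldl_append]
  -- direction 1: left (cx, cy-1), guard cy ≠ 0
  have g1 : (PySem.Int.mod (cx * n + cy) n ≠ 0) ↔ inR n (cx, cy - 1) := by
    rw [hmod]; unfold inR; simp only []; omega
  have e1 : cx * n + cy - 1 = cx * n + (cy - 1) := by ring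
  have r1 : relSt L n (tryNbrA board target (sA, vis) cx (cy - 1))
      ((if PySem.Int.mod (cx * n + cy) n ≠ 0 then [cx * n + cy - 1] else []).foldl
        (growB f target) (sB, seen)) := by
    by_cases hg : PySem.Int.mod (cx * n + cy) n ≠ 0
    · rw [if_pos hg, List.foldl_cons, List.foldl_nil, e1]
      exact tryRel_in hL hb hflat hrel (g1.mp hg)
    · rw [if_neg hg, List.foldl_nil, tryNbrA_out hbI _ (fun hc => hg (g1.mpr hc))]
      exact hrel
  -- direction 2: right (cx, cy+1), guard cy ≠ n-1
  have g2 : (PySem.Int.mod (cx * n + cy) n ≠ n - 1) ↔ inR n (cx, cy + 1) := by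
    rw [hmod]; unfold inR; simp only []; omega
  have e2 : cx * n + cy + 1 = cx * n + (cy + 1) := by ring
  obtain ⟨m1A, v1, hd1⟩ : ∃ a b, tryNbrA board target (sA, vis) cx (cy - 1) = (a, b) :=
    ⟨_, _, rfl⟩
  rw [hd1] at r1 ⊢
  obtain ⟨s1B, t1, hb1⟩ : ∃ a b, ((if PySem.Int.mod (cx * n + cy) n ≠ 0 then
      [cx * n + cy - 1] else []).foldl (growB f target) (sB, seen)) = (a, b) := ⟨_, _, rfl⟩
  rw [hb1] at r1 ⊢
  have r2 : relSt L n (tryNbrA board target (m1A, v1) cx (cy + 1))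
      ((if PySem.Int.mod (cx * n + cy) n ≠ n - 1 then [cx * n + cy + 1] else []).foldl
        (growB f target) (s1B, t1)) := by
    by_cases hg : PySem.Int.mod (cx * n + cy) n ≠ n - 1
    · rw [if_pos hg, List.foldl_cons, List.foldl_nil, e2]
      exact tryRel_in hL hb hflat r1 (g2.mp hg)
    · rw [if_neg hg, List.foldl_nil, tryNbrA_out hbI _ (fun hc => hg (g2.mpr hc))]
      exact r1
  -- direction 3: up (cx-1, cy), guard n ≤ c
  have g3 : (n ≤ cx * n + cy) ↔ inR n (cx - 1, cy) := by
    unfold inR; simp only []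
    constructor
    · intro h; refine ⟨?_, by omega, hcy, hcy2⟩; nlinarith
    · intro h; nlinarith [h.1]
  have e3 : cx * n + cy - n = (cx - 1) * n + cy := by ring
  obtain ⟨m2A, v2, hd2⟩ : ∃ a b, tryNbrA board target (m1A, v1) cx (cy + 1) = (a, b) :=
    ⟨_, _, rfl⟩
  rw [hd2] at r2 ⊢
  obtain ⟨s2B, t2, hb2⟩ : ∃ a b, ((if PySem.Int.mod (cx * n + cy) n ≠ n - 1 then
      [cx * n + cy + 1] else []).foldl (growB f target) (s1B, t1)) = (a, b) := ⟨_, _, rfl⟩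
  rw [hb2] at r2 ⊢
  have r3 : relSt L n (tryNbrA board target (m2A, v2) (cx - 1) cy)
      ((if n ≤ cx * n + cy then [cx * n + cy - n] else []).foldl
        (growB f target) (s2B, t2)) := by
    by_cases hg : n ≤ cx * n + cy
    · rw [if_pos hg, List.foldl_cons, List.foldl_nil, e3]
      exact tryRel_in hL hb hflat r2 (g3.mp hg)
    · rw [if_neg hg, List.foldl_nil, tryNbrA_out hbI _ (fun hc => hg (g3.mpr hc))]
      exact r2
  -- direction 4: down (cx+1, cy), guard c+n < n*n
  have g4 : (cx * n + cy + n < n * n) ↔ inR n (cx + 1, cy) := by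
    unfold inR; simp only []
    constructor
    · intro h; refine ⟨by omega, ?_, hcy, hcy2⟩; nlinarith
    · intro h; nlinarith [h.2.1]
  have e4 : cx * n + cy + n = (cx + 1) * n + cy := by ring
  obtain ⟨m3A, v3, hd3⟩ : ∃ a b, tryNbrA board target (m2A, v2) (cx - 1) cy = (a, b) :=
    ⟨_, _, rfl⟩
  rw [hd3] at r3 ⊢
  obtain ⟨s3B, t3, hb3⟩ : ∃ a b, ((if n ≤ cx * n + cy then
      [cx * n + cy - n] else []).foldl (growB f target) (s2B, t2)) = (a, b) := ⟨_, _, rfl⟩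
  rw [hb3] at r3 ⊢
  by_cases hg : cx * n + cy + n < n * n
  · rw [if_pos hg, List.foldl_cons, List.foldl_nil, e4]
    exact tryRel_in hL hb hflat r3 (g4.mp hg)
  · rw [if_neg hg, List.foldl_nil, tryNbrA_out hbI _ (fun hc => hg (g4.mpr hc))]
    exact r3

theorem loopRel {board : List (List Int)} {f : List Int} {target n : Int} {L : Nat}
    (hL : (L : Int) = n) (hb : board.length = L)
    (hflat : ∀ x y : Int, 0 ≤ x → x < n → 0 ≤ y → y < n →
      PySem.List.pyGetD f (x * n + y) 0 = gridGet board x y) (bx by_ : Int) :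
    ∀ (fuel : Nat) (sA : List (Int × Int)) (vis : List (List Bool)) (seen : PySem.Set Int)
      (cells : List (Int × Int)),
    relSt L n (sA, vis) (sA.map (fun p => p.1 * n + p.2), seen) →
    (dfsLoopA board target bx by_ fuel sA vis
        (cells.map (fun p => (p.1 - bx, p.2 - by_)))).1 =
      ((floodB f target n fuel (sA.map (fun p => p.1 * n + p.2)) seen cells).1).map
        (fun p => (p.1 - bx, p.2 - by_)) ∧
    WFv L (dfsLoopA board target bx by_ fuel sA vis
        (cells.map (fun p => (p.1 - bx, p.2 - by_)))).2 ∧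
    Rvis n (dfsLoopA board target bx by_ fuel sA vis
        (cells.map (fun p => (p.1 - bx, p.2 - by_)))).2
      (floodB f target n fuel (sA.map (fun p => p.1 * n + p.2)) seen cells).2 := by
  intro fuel
  induction fuel with
  | zero =>
    intro sA vis seen cells hrel
    exact ⟨rfl, hrel.2.2.1, hrel.2.2.2⟩
  | succ fuel ih =>
    intro sA vis seen cells hrel
    cases sA with
    | nil => exact ⟨rfl, hrel.2.2.1, hrel.2.2.2⟩
    | cons c rest =>
      obtain ⟨cx, cy⟩ := c
      have hc : inR n (cx, cy) := hrel.2.1 _ (by simp)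
      have hrest : relSt L n (rest, vis) (rest.map (fun p => p.1 * n + p.2), seen) :=
        ⟨rfl, fun p hp => hrel.2.1 p (by simp [hp]), hrel.2.2.1, hrel.2.2.2⟩
      have hstep := stepRel (target := target) hL hb hflat hrest hc
      obtain ⟨aA, vA, hdA⟩ : ∃ a b, dfsStepA board target cx cy (rest, vis) = (a, b) :=
        ⟨_, _, rfl⟩
      obtain ⟨aB, sB', hdB⟩ : ∃ a b,
          (nbrsB n (cx * n + cy)).foldl (growB f target) (rest.map (fun p => p.1 * n + p.2), seen)
            = (a, b) := ⟨_, _, rfl⟩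
      rw [hdA, hdB] at hstep
      try dsimp only at hstep
      have hmap : aB = aA.map (fun p => p.1 * n + p.2) := hstep.1
      have hrel' : relSt L n (aA, vA) (aA.map (fun p => p.1 * n + p.2), sB') :=
        ⟨rfl, hstep.2.1, hstep.2.2.1, hstep.2.2.2⟩
      have hcellA : cells.map (fun p => (p.1 - bx, p.2 - by_)) ++ [(cx - bx, cy - by_)] =
          (cells ++ [(cx, cy)]).map (fun p => (p.1 - bx, p.2 - by_)) := by simp
      have hcellB : cells ++ [(PySem.Int.floordiv (cx * n + cy) n,
          PySem.Int.mod (cx * n + cy) n)] = cells ++ [(cx, cy)] := by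
        rw [(dec_enc hc.2.2.1 hc.2.2.2).1, (dec_enc hc.2.2.1 hc.2.2.2).2]
      have hA : dfsLoopA board target bx by_ (fuel + 1) ((cx, cy) :: rest) vis
          (cells.map (fun p => (p.1 - bx, p.2 - by_))) =
          dfsLoopA board target bx by_ fuel aA vA
            ((cells ++ [(cx, cy)]).map (fun p => (p.1 - bx, p.2 - by_))) := by
        show dfsLoopA board target bx by_ fuel
            (dfsStepA board target cx cy (rest, vis)).1
            (dfsStepA board target cx cy (rest, vis)).2
            (cells.map (fun p => (p.1 - bx, p.2 - by_)) ++ [(cx - bx, cy - by_)]) = _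
        rw [hdA, hcellA]
      have hBf : floodB f target n (fuel + 1)
          (((cx, cy) :: rest).map (fun p => p.1 * n + p.2)) seen cells =
          floodB f target n fuel (aA.map (fun p => p.1 * n + p.2)) sB'
            (cells ++ [(cx, cy)]) := by
        show floodB f target n fuel
            ((nbrsB n (cx * n + cy)).foldl (growB f target)
              (rest.map (fun p => p.1 * n + p.2), seen)).1
            ((nbrsB n (cx * n + cy)).foldl (growB f target)
              (rest.map (fun p => p.1 * n + p.2), seen)).2
            (cells ++ [(PySem.Int.floordiv (cx * n + cy) n, PySem.Int.mod (cx * n + cy) n)]) = _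
        rw [hdB, hcellB, hmap]
      rw [hA, hBf]
      exact ih aA vA sB' (cells ++ [(cx, cy)]) hrel'

-- the flood always emits at least the starting cell
theorem floodB_prefix (f : List Int) (target n : Int) :
    ∀ (fuel : Nat) (stack : List Int) (seen : PySem.Set Int) (cells : List (Int × Int)),
    ∃ t, (floodB f target n fuel stack seen cells).1 = cells ++ t := by
  intro fuel
  induction fuel with
  | zero => intro stack seen cells; exact ⟨[], by simp [floodB]⟩
  | succ fuel ih =>
    intro stack seen cells
    cases stack with
    | nil => exact ⟨[], by simp [floodB]⟩
    | cons c rest =>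
      obtain ⟨t, ht⟩ := ih ((nbrsB n c).foldl (growB f target) (rest, seen)).1
        ((nbrsB n c).foldl (growB f target) (rest, seen)).2
        (cells ++ [(PySem.Int.floordiv c n, PySem.Int.mod c n)])
      refine ⟨(PySem.Int.floordiv c n, PySem.Int.mod c n) :: t, ?_⟩
      show (floodB f target n fuel _ _ _).1 = _
      rw [ht]
      simp

theorem floodB_cells_ne (f : List Int) (target n : Int) (fuel : Nat) (k : Int)
    (seen : PySem.Set Int) (hf : 0 < fuel) :
    (floodB f target n fuel [k] seen []).1 ≠ [] := by
  obtain ⟨fuel', rfl⟩ : ∃ m, fuel = m + 1 := ⟨fuel - 1, by omega⟩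
  obtain ⟨t, ht⟩ := floodB_prefix f target n fuel'
    ((nbrsB n k).foldl (growB f target) ([], seen)).1
    ((nbrsB n k).foldl (growB f target) ([], seen)).2
    [(PySem.Int.floordiv k n, PySem.Int.mod k n)]
  show (floodB f target n fuel' _ _ ([] ++ [(PySem.Int.floordiv k n, PySem.Int.mod k n)])).1 ≠ []
  rw [List.nil_append, ht]
  simp

-- ==== the outer scans ====

def flatCells (n : Nat) : List (Int × Int) :=
  (PySem.List.pyRange 0 (n : Int) 1).flatMap
    (fun i => (PySem.List.pyRange 0 (n : Int) 1).map (fun j => (i, j)))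

def initVis (n : Nat) : List (List Bool) := List.replicate n (List.replicate n false)

def collectStepA (board : List (List Int)) (target : Int)
    (st : List (List Bool) × List (List (Int × Int))) (p : Int × Int) :
    List (List Bool) × List (List (Int × Int)) :=
  if gridGet board p.1 p.2 = target ∧ visGet st.1 p.1 p.2 = false then
    let r := dfsA board target p.1 p.2 p.1 p.2 st.1
    (r.2, st.2 ++ [pyNormalize r.1])
  else st

def stepA1 (tb : List (List Int)) (st : List (List Bool) × List (List (Int × Int)))
    (p : Int × Int) : List (List Bool) × List (List (Int × Int)) :=
  if gridGet tb p.1 p.2 == 1 ∧ visGet st.1 p.1 p.2 = false then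
    let r := dfsA tb 1 p.1 p.2 p.1 p.2 st.1
    (r.2, st.2 ++ [pyNormalize r.1])
  else st

def stepA2 (gb : List (List Int))
    (st : List (List Bool) × (List (List (Int × Int)) × Int)) (p : Int × Int) :
    List (List Bool) × (List (List (Int × Int)) × Int) :=
  if gridGet gb p.1 p.2 == 0 ∧ visGet st.1 p.1 p.2 = false then
    let r := dfsA gb 0 p.1 p.2 p.1 p.2 st.1
    match findMatchA st.2.1 r.1 with
    | some bl => (r.2, ((PySem.List.remove? st.2.1 bl.1).getD st.2.1, st.2.2 + bl.2))
    | none => (r.2, st.2)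
  else st

def matchStep (st : PySem.Dict (List (Int × Int)) Int × Int) (vac : List (Int × Int)) :
    PySem.Dict (List (Int × Int)) Int × Int :=
  let key := canonB vac
  if st.1.getD key 0 > 0 then (st.1.insert key (st.1.getD key 0 - 1), st.2 + (vac.length : Int))
  else st

def bScan (f : List Int) (n : Int) (fuel : Nat) (target : Int)
    (st : PySem.Set Int × List (List (Int × Int))) (k : Int) :
    PySem.Set Int × List (List (Int × Int)) :=
  if PySem.List.pyGetD f k 0 = target ∧ k ∉ st.1 then
    let r := floodB f target n fuel [k] (PySem.Set.add st.1 k) []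
    (r.2, st.2 ++ [pyNormalize r.1])
  else st

theorem stepA1_eq_collect (tb : List (List Int)) : stepA1 tb = collectStepA tb 1 := by
  funext st p
  unfold stepA1 collectStepA
  by_cases hc : gridGet tb p.1 p.2 = 1 ∧ visGet st.1 p.1 p.2 = false
  · rw [if_pos (by simpa using hc), if_pos hc]
  · rw [if_neg (by simpa using hc), if_neg hc]

-- lockstep of the two outer scans over corresponding cell sequences
theorem scanRel {board : List (List Int)} {f : List Int} {target n : Int} {L : Nat}
    (hL : (L : Int) = n) (hb : board.length = L)
    (hflat : ∀ x y : Int, 0 ≤ x → x < n → 0 ≤ y → y < n →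
      PySem.List.pyGetD f (x * n + y) 0 = gridGet board x y)
    {fuel : Nat} (hfuel : fuel = board.length * board.length + 1) :
    ∀ (ps : List (Int × Int)) (vis : List (List Bool)) (seen : PySem.Set Int)
      (acc : List (List (Int × Int))),
    WFv L vis → Rvis n vis seen → (∀ p ∈ ps, inR n p) →
    (ps.foldl (fun st p => bScan f n (board.length * board.length + 1) target st (p.1 * n + p.2)) (seen, acc)).2 =
      (ps.foldl (collectStepA board target) (vis, acc)).2 := by
  subst hfuel
  intro ps
  induction ps with
  | nil => intro vis seen acc _ _ _; rfl
  | cons p ps ih =>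
    intro vis seen acc hWF hR hin
    obtain ⟨hx, hx2, hy, hy2⟩ := hin p (by simp)
    obtain ⟨x, y⟩ := p
    simp only [List.foldl_cons]
    have hg : PySem.List.pyGetD f (x * n + y) 0 = gridGet board x y := hflat x y hx hx2 hy hy2
    have hv : (visGet vis x y = true) ↔ (x * n + y) ∈ seen := hR x y hx hx2 hy hy2
    by_cases hcase : gridGet board x y = target ∧ visGet vis x y = false
    · -- both open a new component at (x, y)
      have hBg : PySem.List.pyGetD f (x * n + y) 0 = target ∧ (x * n + y) ∉ seen := by
        refine ⟨by rw [hg]; exact hcase.1, ?_⟩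
        intro hm
        rw [← hv] at hm
        simp [hm] at hcase
      have hA : collectStepA board target (vis, acc) (x, y) =
          ((dfsA board target x y x y vis).2,
            acc ++ [pyNormalize (dfsA board target x y x y vis).1]) := by
        unfold collectStepA
        rw [if_pos hcase]
      have hB : bScan f n (board.length * board.length + 1) target (seen, acc) (x * n + y) =
          ((floodB f target n (board.length * board.length + 1) [x * n + y] (PySem.Set.add seen (x * n + y)) []).2,
            acc ++ [pyNormalize
              (floodB f target n (board.length * board.length + 1) [x * n + y] (PySem.Set.add seen (x * n + y)) []).1]) := by
        unfold bScan
        rw [if_pos ⟨hBg.1, hBg.2⟩]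
      rw [hA, hB]
      -- relate the two floods via loopRel
      have hrel0 : relSt L n ([(x, y)], visSet vis x y)
          ([(x, y)].map (fun p => p.1 * n + p.2), PySem.Set.add seen (x * n + y)) := by
        refine ⟨rfl, ?_, WFv_visSet hWF hx hy, Rvis_visSet hL hWF hR hx hx2 hy hy2⟩
        intro q hq
        rcases List.mem_cons.mp hq with rfl | hq
        · exact ⟨hx, hx2, hy, hy2⟩
        · simp at hq
      have hloop := loopRel (target := target) hL hb hflat x y (board.length * board.length + 1)
        [(x, y)] (visSet vis x y) (PySem.Set.add seen (x * n + y)) [] hrel0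
      simp only [List.map_nil] at hloop
      have hdfs : dfsA board target x y x y vis =
          dfsLoopA board target x y (board.length * board.length + 1) [(x, y)]
            (visSet vis x y) [] := rfl
      have hmapenc : [(x, y)].map (fun p : Int × Int => p.1 * n + p.2) = [x * n + y] := by simp
      rw [hmapenc] at hloop
      have hne : (floodB f target n (board.length * board.length + 1) [x * n + y]
          (PySem.Set.add seen (x * n + y)) []).1 ≠ [] :=
        floodB_cells_ne _ _ _ _ _ _ (by omega)
      have hnorm : pyNormalize (dfsA board target x y x y vis).1 =
          pyNormalize (floodB f target n (board.length * board.length + 1) [x * n + y]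
            (PySem.Set.add seen (x * n + y)) []).1 := by
        rw [hdfs, hloop.1]
        have : ((floodB f target n (board.length * board.length + 1) [x * n + y]
            (PySem.Set.add seen (x * n + y)) []).1).map (fun p => (p.1 - x, p.2 - y)) =
            ((floodB f target n (board.length * board.length + 1) [x * n + y]
            (PySem.Set.add seen (x * n + y)) []).1).map (fun p => (p.1 + (-x), p.2 + (-y))) := by
          apply List.map_congr_left; intro q _
          refine Prod.ext ?_ ?_ <;> dsimp <;> ring
        rw [this, norm_shift hne]
      rw [hnorm]
      exact ih (dfsA board target x y x y vis).2
        (floodB f target n (board.length * board.length + 1) [x * n + y]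
          (PySem.Set.add seen (x * n + y)) []).2
        (acc ++ [pyNormalize (floodB f target n (board.length * board.length + 1) [x * n + y]
          (PySem.Set.add seen (x * n + y)) []).1])
        (by rw [hdfs]; exact hloop.2.1) (by rw [hdfs]; exact hloop.2.2)
        (fun q hq => hin q (by simp [hq]))
    · -- both skip
      have hA : collectStepA board target (vis, acc) (x, y) = (vis, acc) := by
        unfold collectStepA; rw [if_neg hcase]
      have hB : bScan f n (board.length * board.length + 1) target (seen, acc) (x * n + y) = (seen, acc) := by
        unfold bScan
        rw [if_neg]
        intro hc
        apply hcase
        refine ⟨by rw [← hg]; exact hc.1, ?_⟩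
        cases hq : visGet vis x y
        · rfl
        · exact absurd (hv.mp hq) hc.2
      rw [hA, hB]
      exact ih vis seen acc hWF hR (fun q hq => hin q (by simp [hq]))

-- pyRange 0 (n*n) is the row-major enumeration of the grid cells
theorem range_flat (n : Nat) :
    PySem.List.pyRange 0 ((n : Int) * (n : Int)) 1 =
      (flatCells n).map (fun p => p.1 * (n : Int) + p.2) := by
  unfold flatCells
  rw [List.map_flatMap]
  have key : ∀ m : Nat, (m : Int) ≤ (n : Int) →
      PySem.List.pyRange 0 ((m : Int) * (n : Int)) 1 =
        (PySem.List.pyRange 0 (m : Int) 1).flatMap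
          (fun i => ((PySem.List.pyRange 0 (n : Int) 1).map (fun j => (i, j))).map
            (fun p => p.1 * (n : Int) + p.2)) := by
    intro m
    induction m with
    | zero => intro _; simp [PySem.List.pyRange_one_eq_nil]
    | succ m ihm =>
      intro hm
      have hm' : (m : Int) ≤ (n : Int) := by push_cast at hm ⊢; omega
      have h1 : PySem.List.pyRange 0 (((m : Int) + 1) * (n : Int)) 1 =
          PySem.List.pyRange 0 ((m : Int) * (n : Int)) 1 ++
          PySem.List.pyRange ((m : Int) * (n : Int)) (((m : Int) + 1) * (n : Int)) 1 := by
        apply PySem.List.pyRange_one_append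
        · positivity
        · nlinarith [Nat.cast_nonneg (α := Int) n]
      have h2 : PySem.List.pyRange 0 ((m : Int) + 1) 1 =
          PySem.List.pyRange 0 (m : Int) 1 ++ [(m : Int)] := by
        rw [← PySem.List.pyRange_one_succ_right]
        positivity
      have h3 : PySem.List.pyRange ((m : Int) * (n : Int)) (((m : Int) + 1) * (n : Int)) 1 =
          ((PySem.List.pyRange 0 (n : Int) 1).map (fun j => ((m : Int), j))).map
            (fun p => p.1 * (n : Int) + p.2) := by
        rw [List.map_map, PySem.List.pyRange_one, PySem.List.pyRange_one, List.map_map]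
        have hlen : (((m : Int) + 1) * (n : Int) - (m : Int) * (n : Int)).toNat =
            ((n : Int) - 0).toNat := by
          congr 1
          ring
        rw [hlen]
        apply List.map_congr_left
        intro k _
        simp only [Function.comp]
        push_cast
        ring
      push_cast
      rw [h1, h2, List.flatMap_append, ihm hm', h3]
      simp [List.flatMap_cons]
  have := key n le_rfl
  rw [this]

theorem mem_flatCells {n : Nat} {p : Int × Int} (h : p ∈ flatCells n) : inR (n : Int) p := by
  unfold flatCells at h
  rw [List.mem_flatMap] at h
  obtain ⟨i, hi, hp⟩ := h
  rw [List.mem_map] at hp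
  obtain ⟨j, hj, rfl⟩ := hp
  rw [PySem.List.mem_pyRange_one] at hi hj
  exact ⟨hi.1, hi.2, hj.1, hj.2⟩

theorem WFv_init (n : Nat) : WFv n (initVis n) := by
  refine ⟨by simp [initVis], ?_⟩
  intro i hi
  simp only [initVis, List.length_replicate] at hi
  rw [List.getD_eq_getElem?_getD]
  simp [initVis, List.getElem?_replicate, hi]

theorem Rvis_init (n : Nat) : Rvis (n : Int) (initVis n) PySem.Set.empty := by
  intro x y hx hx2 hy hy2
  rw [visGet_getD _ _ _ hx hy]
  have h1 : (initVis n).getD x.toNat [] = List.replicate n false := by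
    rw [List.getD_eq_getElem?_getD]
    simp [initVis, List.getElem?_replicate, show x.toNat < n by omega]
  rw [h1, List.getD_eq_getElem?_getD]
  simp [List.getElem?_replicate, show y.toNat < n by omega, PySem.Set.empty]

-- compsB computes exactly the list of normalized components A's scan produces
theorem comps_rel (board : List (List Int)) (target n : Int) (fuel : Nat)
    (hb : (board.length : Int) = n)
    (hrows : ∀ r ∈ board, r.length = board.length)
    (hfuel : fuel = board.length * board.length + 1) :
    compsB (flatB board) n fuel target =
      ((flatCells board.length).foldl (collectStepA board target)
        (initVis board.length, [])).2 := by
  subst hfuel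
  have hflat : ∀ x y : Int, 0 ≤ x → x < n → 0 ≤ y → y < n →
      PySem.List.pyGetD (flatB board) (x * n + y) 0 = gridGet board x y := by
    intro x y hx hx2 hy hy2
    rw [← hb] at hx2 hy2 ⊢
    exact flat_get_aux board board.length hrows x y hx hx2 hy hy2
  unfold compsB
  have hrange : PySem.List.pyRange 0 (n * n) 1 =
      (flatCells board.length).map (fun p => p.1 * n + p.2) := by
    rw [← hb]
    exact range_flat board.length
  rw [hrange, List.foldl_map]
  exact scanRel (target := target) (L := board.length) hb rfl hflat rfl
    (flatCells board.length) (initVis board.length) PySem.Set.empty []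
    (WFv_init board.length) (hb ▸ Rvis_init board.length)
    (fun p hp => hb ▸ mem_flatCells hp)

-- appended accumulator distributes over A's collecting scan
theorem collect_acc (board : List (List Int)) (target : Int) :
    ∀ (cells : List (Int × Int)) (vis : List (List Bool)) (acc : List (List (Int × Int))),
    cells.foldl (collectStepA board target) (vis, acc) =
      ((cells.foldl (collectStepA board target) (vis, [])).1,
        acc ++ (cells.foldl (collectStepA board target) (vis, [])).2) := by
  intro cells
  induction cells with
  | nil => intro vis acc; simp
  | cons p cells ih =>
    intro vis acc
    simp only [List.foldl_cons]
    by_cases hc : gridGet board p.1 p.2 = target ∧ visGet vis p.1 p.2 = false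
    · rw [show collectStepA board target (vis, acc) p =
          ((dfsA board target p.1 p.2 p.1 p.2 vis).2,
           acc ++ [pyNormalize (dfsA board target p.1 p.2 p.1 p.2 vis).1]) from by
          unfold collectStepA; rw [if_pos hc],
        show collectStepA board target (vis, []) p =
          ((dfsA board target p.1 p.2 p.1 p.2 vis).2,
           [] ++ [pyNormalize (dfsA board target p.1 p.2 p.1 p.2 vis).1]) from by
          unfold collectStepA; rw [if_pos hc]]
      rw [ih _ ([] ++ _), ih _ (acc ++ _)]
      simp
    · rw [show collectStepA board target (vis, acc) p = (vis, acc) from by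
          unfold collectStepA; rw [if_neg hc],
        show collectStepA board target (vis, []) p = (vis, []) from by
          unfold collectStepA; rw [if_neg hc]]
      exact ih vis acc

-- A's greedy matching scan equals the counter-keyed matching over the component list
theorem sim (gb : List (List Int)) :
    ∀ (cells : List (Int × Int)) (vis : List (List Bool)) (blocks : List (List (Int × Int)))
      (ans : Int) (supply : PySem.Dict (List (Int × Int)) Int),
    (∀ k, supply.getD k 0 = ((blocks.countP (fun b => canonB b == k)) : Int)) →
    (cells.foldl (stepA2 gb) (vis, (blocks, ans))).2.2 =
      (((cells.foldl (collectStepA gb 0) (vis, [])).2).foldl matchStep (supply, ans)).2 := by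
  intro cells
  induction cells with
  | nil => intro vis blocks ans supply _; rfl
  | cons p cells ih =>
    intro vis blocks ans supply hinv
    simp only [List.foldl_cons]
    by_cases hc : gridGet gb p.1 p.2 = 0 ∧ visGet vis p.1 p.2 = false
    · have hcol : collectStepA gb 0 (vis, []) p =
          ((dfsA gb 0 p.1 p.2 p.1 p.2 vis).2,
           [pyNormalize (dfsA gb 0 p.1 p.2 p.1 p.2 vis).1]) := by
        unfold collectStepA; rw [if_pos hc]; rfl
      set vacA := (dfsA gb 0 p.1 p.2 p.1 p.2 vis).1 with hvacA
      set v := pyNormalize vacA with hv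
      have hkey : canonB v = canonB vacA := canon_norm vacA
      have hlenv : v.length = vacA.length := by rw [hv, norm_length]
      rw [hcol, collect_acc gb 0 cells (dfsA gb 0 p.1 p.2 p.1 p.2 vis).2 [v]]
      simp only [List.singleton_append, List.foldl_cons]
      rcases hm : findMatchA blocks vacA with _ | bl
      · have hcnt : blocks.countP (fun b => canonB b == canonB v) = 0 := by
          by_contra hnz
          obtain ⟨b, hb, hbc⟩ := List.countP_pos_iff.mp (Nat.pos_of_ne_zero hnz)
          have : canonB b = canonB vacA := by
            rw [← hkey]; simpa using hbc
          have := findMatch_isSome ⟨b, hb, this⟩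
          rw [hm] at this
          simp at this
        have hz : supply.getD (canonB v) 0 = 0 := by rw [hinv, hcnt]; rfl
        have hms : matchStep (supply, ans) v = (supply, ans) := by
          unfold matchStep
          simp only []
          rw [if_neg (by rw [hz]; omega)]
        have hstep : stepA2 gb (vis, (blocks, ans)) p =
            ((dfsA gb 0 p.1 p.2 p.1 p.2 vis).2, (blocks, ans)) := by
          unfold stepA2
          dsimp only
          rw [if_pos (by simpa using hc)]
          rw [show (dfsA gb 0 p.1 p.2 p.1 p.2 vis).1 = vacA from rfl, hm]
        rw [hstep, hms]
        exact ih (dfsA gb 0 p.1 p.2 p.1 p.2 vis).2 blocks ans supply hinv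
      · obtain ⟨hcanon, hmem, hbl2, hlenbl⟩ := findMatch_some hm
        have hbk : canonB bl.1 = canonB v := by rw [hcanon, hkey]
        have hposN : 0 < blocks.countP (fun b => canonB b == canonB v) :=
          List.countP_pos_iff.mpr ⟨bl.1, hmem, by simpa using hbk⟩
        have hpos : supply.getD (canonB v) 0 > 0 := by
          rw [hinv]; exact_mod_cast hposN
        have hansv : bl.2 = (v.length : Int) := by
          rw [hbl2, hlenbl, hlenv]
        have hstep : stepA2 gb (vis, (blocks, ans)) p =
            ((dfsA gb 0 p.1 p.2 p.1 p.2 vis).2, (blocks.erase bl.1, ans + bl.2)) := by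
          unfold stepA2
          dsimp only
          rw [if_pos (by simpa using hc)]
          rw [show (dfsA gb 0 p.1 p.2 p.1 p.2 vis).1 = vacA from rfl, hm]
          show ((dfsA gb 0 p.1 p.2 p.1 p.2 vis).2,
            (PySem.List.remove? blocks bl.1).getD blocks, ans + bl.2) =
            ((dfsA gb 0 p.1 p.2 p.1 p.2 vis).2, blocks.erase bl.1, ans + bl.2)
          rw [PySem.List.remove?_eq_some_erase blocks bl.1 hmem]
          rfl
        have hms : matchStep (supply, ans) v =
            (supply.insert (canonB v) (supply.getD (canonB v) 0 - 1), ans + (v.length : Int)) := by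
          unfold matchStep
          simp only []
          rw [if_pos hpos]
        have hinv' : ∀ k, (supply.insert (canonB v) (supply.getD (canonB v) 0 - 1)).getD k 0 =
            (((blocks.erase bl.1).countP (fun b => canonB b == k)) : Int) := by
          intro k
          rw [PySem.Dict.getD_insert]
          have hsplit := countP_erase_add (fun b => canonB b == k) hmem
          by_cases hk : k = canonB v
          · subst hk
            rw [if_pos rfl]
            rw [if_pos (by simpa using hbk)] at hsplit
            rw [hinv, hsplit]
            push_cast
            omega
          · rw [if_neg hk]
            rw [if_neg (by simp only [beq_iff_eq]; rw [hbk]; exact fun hq => hk hq.symm)] at hsplit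
            rw [hinv, hsplit]
            push_cast
            omega
        rw [hstep, hms, ← hansv]
        exact ih (dfsA gb 0 p.1 p.2 p.1 p.2 vis).2 (blocks.erase bl.1) (ans + bl.2)
          (supply.insert (canonB v) (supply.getD (canonB v) 0 - 1)) hinv'
    · rw [show stepA2 gb (vis, (blocks, ans)) p = (vis, (blocks, ans)) from by
          unfold stepA2; rw [if_neg (by simpa using hc)],
        show collectStepA gb 0 (vis, []) p = (vis, []) from by
          unfold collectStepA; rw [if_neg hc]]
      exact ih vis blocks ans supply hinv

theorem foldl_nested {α β γ : Type} (l1 : List α) (l2 : List β) (g : γ → α → β → γ)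
    (init : γ) :
    l1.foldl (fun st i => l2.foldl (fun st j => g st i j) st) init =
      (l1.flatMap (fun i => l2.map (fun j => (i, j)))).foldl (fun st p => g st p.1 p.2) init := by
  induction l1 generalizing init with
  | nil => rfl
  | cons i l1 ih => simp only [List.foldl_cons, List.flatMap_cons, List.foldl_append,
      List.foldl_map, ih]

theorem solution_flat (gb tb : List (List Int)) :
    solution gb tb =
      ((flatCells tb.length).foldl (stepA2 gb)
        (initVis tb.length,
          (((flatCells tb.length).foldl (stepA1 tb) (initVis tb.length, [])).2, 0))).2.2 := by
  unfold solution
  simp only []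
  rw [foldl_nested, foldl_nested]
  rfl

theorem solution_eq_alt (gb tb : List (List Int)) (hpre : Pre_solution gb tb) :
    solution gb tb = solution_alt gb tb := by
  obtain ⟨hlen, hgrows, htrows⟩ := hpre
  have hcompsT : compsB (flatB tb) ((tb.length : Int)) (tb.length * tb.length + 1) 1 =
      ((flatCells tb.length).foldl (collectStepA tb 1) (initVis tb.length, [])).2 :=
    comps_rel tb 1 _ _ rfl htrows rfl
  have hcompsG : compsB (flatB gb) ((tb.length : Int)) (gb.length * gb.length + 1) 0 =
      ((flatCells gb.length).foldl (collectStepA gb 0) (initVis gb.length, [])).2 :=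
    comps_rel gb 0 _ _ (by rw [hlen]) hgrows rfl
  rw [solution_flat, stepA1_eq_collect]
  set blocks := ((flatCells tb.length).foldl (collectStepA tb 1) (initVis tb.length, [])).2
    with hblocks
  set supply0 := (compsB (flatB tb) ((tb.length : Int)) (tb.length * tb.length + 1) 1).foldl
    (fun d s => d.insert (canonB s) (d.getD (canonB s) 0 + 1))
    (PySem.Dict.empty : PySem.Dict (List (Int × Int)) Int) with hsupply0
  have hinv0 : ∀ k, supply0.getD k 0 = ((blocks.countP (fun b => canonB b == k)) : Int) := by
    intro k
    have hmap : (((compsB (flatB tb) ((tb.length : Int)) (tb.length * tb.length + 1) 1).map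
        canonB).foldl (fun d x => d.insert x (d.getD x 0 + 1)) PySem.Dict.empty).getD k 0 =
        supply0.getD k 0 := by
      rw [hsupply0]
      exact congrArg (fun d : PySem.Dict (List (Int × Int)) Int => d.getD k 0) List.foldl_map
    rw [← hmap, PySem.Dict.getD_foldl_insert_add_one,
      PySem.Dict.getD_empty, List.count_eq_countP, List.countP_map, zero_add, hcompsT]
    exact_mod_cast congrArg Nat.cast (List.countP_congr (fun a _ => Iff.rfl))
  have hB : solution_alt gb tb =
      ((compsB (flatB gb) ((tb.length : Int)) (gb.length * gb.length + 1) 0).foldl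
        matchStep (supply0, 0)).2 := by
    unfold solution_alt matchStep
    rfl
  rw [hB, hcompsG]
  have hA := sim gb (flatCells tb.length) (initVis tb.length) blocks 0 supply0 hinv0
  rw [hA]
  rw [show tb.length = gb.length from hlen.symm]

-- ===== VERDICT (by name: the statement is the Claim_ definition above) =====
theorem solution_spec : Claim_equal_solution := by
  intro game_board table _ hpre
  unfold Spec_solution
  exact solution_eq_alt game_board table hpre
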